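-- pv_equiv track=rewrite | github.com/shabaz123/ktools | spice_lib_local_gui.py | _read_token_after_paren
-- ===== SOURCE A (Python) =====
-- def _read_token_after_paren(line: str, start: int) -> str:
--     j = start
--     while j < len(line) and line[j].isspace():
--         j += 1
--     k = j
--     while k < len(line) and not line[k].isspace() and line[k] not in '()':
--         k += 1
--     return line[j:k]
-- ===== SOURCE B (Python) =====
-- import re
--
-- # One regex does both scans: skip leading whitespace, capture the run of
-- # non-whitespace, non-parenthesis characters.
-- _TOKEN_RE = re.compile(r'\s*([^\s()]*)')
--
--
-- def _read_token_after_paren(line: str, start: int) -> str: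
--     return _TOKEN_RE.match(line[start:]).group(1)
-- ===== Notes on version B (the rewrite author's own statement) =====
-- stated objective: idiomatic
-- what changed: Replaces the two stateful index-scanning while-loops with a single precompiled regex r'\s*([^\s()]*)' matched against line[start:], returning the captured group (the scan runs in the C regex engine instead of a Python char loop).
-- outside the precondition, e.g. on _read_token_after_paren(' b', -2): A returns '', B returns 'b'; on _read_token_after_paren('ab', -5): A raises IndexError, B returns 'ab'
import Mathlib
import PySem

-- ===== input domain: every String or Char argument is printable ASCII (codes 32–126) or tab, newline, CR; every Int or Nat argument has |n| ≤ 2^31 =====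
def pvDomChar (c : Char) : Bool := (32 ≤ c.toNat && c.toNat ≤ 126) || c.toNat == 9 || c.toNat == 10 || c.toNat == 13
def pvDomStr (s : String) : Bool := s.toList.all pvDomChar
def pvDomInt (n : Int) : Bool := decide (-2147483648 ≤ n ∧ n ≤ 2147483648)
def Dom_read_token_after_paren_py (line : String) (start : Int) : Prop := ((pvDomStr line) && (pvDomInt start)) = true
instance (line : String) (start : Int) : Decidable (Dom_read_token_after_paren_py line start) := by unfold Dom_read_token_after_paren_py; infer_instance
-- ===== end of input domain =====

-- B replaces A's two stateful index-scanning while-loops by one regex match on the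
-- slice line[start:] (idiomatic; a timing run measured it faster by a constant factor).

-- ===== PORT A =====
-- first while-loop: skip whitespace from index j
def pvA_skip (cs : List Char) (j : Int) : Int :=
  if _h : j < (cs.length : Int) then
    match PySem.List.pyGet? cs j with
    | some c => if PySem.Chars.isspace c then pvA_skip cs (j + 1) else j
    | none => j   -- Python raises IndexError here (negative j below -len); outside Pre_
  else j
termination_by ((cs.length : Int) - j).toNat
decreasing_by omega

-- second while-loop: advance k over non-space, non-paren characters
def pvA_scan (cs : List Char) (k : Int) : Int :=
  if _h : k < (cs.length : Int) then
    match PySem.List.pyGet? cs k with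
    | some c =>
        if !PySem.Chars.isspace c && !(c == '(' || c == ')') then pvA_scan cs (k + 1) else k
    | none => k   -- Python raises IndexError here; outside Pre_
  else k
termination_by ((cs.length : Int) - k).toNat
decreasing_by omega

def read_token_after_paren_py (line : String) (start : Int) : String :=
  let cs := line.toList
  let j := pvA_skip cs start
  let k := pvA_scan cs j
  String.mk (PySem.List.slice cs (some j) (some k))   -- line[j:k]

-- ===== PORT B =====
-- Source B: _TOKEN_RE.match(line[start:]).group(1) with _TOKEN_RE = re.compile(r'\s*([^\s()]*)')
-- The regex match is ported by its standard-library semantics: '\s*' consumes the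
-- maximal leading whitespace run (dropWhile), '([^\s()]*)' captures the maximal
-- following run of non-space non-paren characters (takeWhile).
def read_token_after_paren_py_alt (line : String) (start : Int) : String :=
  let rest := PySem.List.slice line.toList (some start) none   -- line[start:]
  String.mk ((rest.dropWhile PySem.Chars.isspace).takeWhile
    (fun c => !(PySem.Chars.isspace c || c == '(' || c == ')')))

-- ===== PRECONDITION & SPEC =====
-- Pre_ restricts to the natural domain start ≥ 0 of a scan-start index: for
-- start < -len(line) A raises IndexError, and for -len(line) ≤ start < 0 A's
-- negative-index wraparound restarts the scan at the front of the string and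
-- returns accidental values no caller relies on (see cites).
def Pre_read_token_after_paren_py (line : String) (start : Int) : Prop := 0 ≤ start
instance (line : String) (start : Int) : Decidable (Pre_read_token_after_paren_py line start) := by
  unfold Pre_read_token_after_paren_py; infer_instance

def pvWitness_read_token_after_paren_py : String × Int := (" a", 0)

def Spec_read_token_after_paren_py (line : String) (start : Int) (out : String) : Prop :=
  out = read_token_after_paren_py_alt line start
instance (line : String) (start : Int) (out : String) : Decidable (Spec_read_token_after_paren_py line start out) := by
  unfold Spec_read_token_after_paren_py; infer_instance

-- ===== CLAIM (what is proved, stated in full; the proofs are below) =====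
def Claim_equal_read_token_after_paren_py : Prop :=
  ∀ (line : String) (start : Int), Dom_read_token_after_paren_py line start →
    Pre_read_token_after_paren_py line start →
    Spec_read_token_after_paren_py line start (read_token_after_paren_py line start)

-- ===== LEMMAS AND PROOFS =====

-- take back the takeWhile prefix
theorem pv_take_length_takeWhile {α : Type} (p : α → Bool) (l : List α) :
    l.take (l.takeWhile p).length = l.takeWhile p := by
  induction l with
  | nil => rfl
  | cons a l ih =>
      by_cases h : p a = true
      · simp [h, ih]
      · simp [h]

-- drop past the takeWhile prefix is dropWhile
theorem pv_drop_length_takeWhile {α : Type} (p : α → Bool) (l : List α) :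
    l.drop (l.takeWhile p).length = l.dropWhile p := by
  induction l with
  | nil => rfl
  | cons a l ih =>
      by_cases h : p a = true
      · simp [h, ih]
      · simp [h]

theorem pvA_skip_spec (cs : List Char) (j : Int) (hj : 0 ≤ j) :
    pvA_skip cs j = j + (((cs.drop j.toNat).takeWhile PySem.Chars.isspace).length : Int) := by
  fun_induction pvA_skip cs j with
  | case1 j h c hget hc ih =>
      have hjn : j.toNat < cs.length := by omega
      have hget' : PySem.List.pyGet? cs j = some cs[j.toNat] :=
        PySem.List.pyGet?_eq_some_getElem cs hj (by omega)
      have hc' : PySem.Chars.isspace cs[j.toNat] = true := by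
        rw [hget'] at hget; cases hget; exact hc
      have hdrop : cs.drop j.toNat = cs[j.toNat] :: cs.drop (j.toNat + 1) :=
        (List.getElem_cons_drop hjn).symm
      have hsucc : (j + 1).toNat = j.toNat + 1 := by omega
      rw [ih (by omega), hdrop, List.takeWhile_cons, hc', hsucc]
      simp; omega
  | case2 j h c hget hc =>
      have hjn : j.toNat < cs.length := by omega
      have hget' : PySem.List.pyGet? cs j = some cs[j.toNat] :=
        PySem.List.pyGet?_eq_some_getElem cs hj (by omega)
      have hc' : ¬ PySem.Chars.isspace cs[j.toNat] = true := by
        rw [hget'] at hget; cases hget; exact hc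
      have hdrop : cs.drop j.toNat = cs[j.toNat] :: cs.drop (j.toNat + 1) :=
        (List.getElem_cons_drop hjn).symm
      rw [hdrop, List.takeWhile_cons]
      simp [hc']
  | case3 j h hget =>
      exfalso
      have : PySem.List.pyGet? cs j = some cs[j.toNat] :=
        PySem.List.pyGet?_eq_some_getElem cs hj (by omega)
      rw [this] at hget; simp at hget
  | case4 j h =>
      have : cs.length ≤ j.toNat := by omega
      rw [List.drop_eq_nil_of_le this]
      simp

def pvGood (c : Char) : Bool := !PySem.Chars.isspace c && !(c == '(' || c == ')')

theorem pvA_scan_spec (cs : List Char) (k : Int) (hk : 0 ≤ k) :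
    pvA_scan cs k = k + (((cs.drop k.toNat).takeWhile pvGood).length : Int) := by
  fun_induction pvA_scan cs k with
  | case1 k h c hget hc ih =>
      have hkn : k.toNat < cs.length := by omega
      have hget' : PySem.List.pyGet? cs k = some cs[k.toNat] :=
        PySem.List.pyGet?_eq_some_getElem cs hk (by omega)
      have hc' : pvGood cs[k.toNat] = true := by
        rw [hget'] at hget; cases hget; exact hc
      have hdrop : cs.drop k.toNat = cs[k.toNat] :: cs.drop (k.toNat + 1) :=
        (List.getElem_cons_drop hkn).symm
      have hsucc : (k + 1).toNat = k.toNat + 1 := by omega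
      rw [ih (by omega), hdrop, List.takeWhile_cons, hc', hsucc]
      simp; omega
  | case2 k h c hget hc =>
      have hkn : k.toNat < cs.length := by omega
      have hget' : PySem.List.pyGet? cs k = some cs[k.toNat] :=
        PySem.List.pyGet?_eq_some_getElem cs hk (by omega)
      have hc' : pvGood cs[k.toNat] = false := by
        rw [hget'] at hget; cases hget; unfold pvGood; simpa using hc
      have hdrop : cs.drop k.toNat = cs[k.toNat] :: cs.drop (k.toNat + 1) :=
        (List.getElem_cons_drop hkn).symm
      rw [hdrop, List.takeWhile_cons, hc']
      simp
  | case3 k h hget =>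
      exfalso
      have : PySem.List.pyGet? cs k = some cs[k.toNat] :=
        PySem.List.pyGet?_eq_some_getElem cs hk (by omega)
      rw [this] at hget; simp at hget
  | case4 k h =>
      have : cs.length ≤ k.toNat := by omega
      rw [List.drop_eq_nil_of_le this]
      simp

theorem pvGood_eq (c : Char) :
    pvGood c = !(PySem.Chars.isspace c || c == '(' || c == ')') := by
  unfold pvGood
  cases hs : PySem.Chars.isspace c <;> simp [hs]

-- ===== VERDICT (by name: the statement is the Claim_ definition above) =====
theorem read_token_after_paren_py_spec : Claim_equal_read_token_after_paren_py := by
  intro line start _hDom hPre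
  have hs : 0 ≤ start := hPre
  unfold Spec_read_token_after_paren_py
  set cs := line.toList with hcs
  show read_token_after_paren_py line start = read_token_after_paren_py_alt line start
  have hA : read_token_after_paren_py line start
      = String.mk (PySem.List.slice cs (some (pvA_skip cs start)) (some (pvA_scan cs (pvA_skip cs start)))) := rfl
  have hB : read_token_after_paren_py_alt line start
      = String.mk (((PySem.List.slice cs (some start) none).dropWhile PySem.Chars.isspace).takeWhile
          (fun c => !(PySem.Chars.isspace c || c == '(' || c == ')'))) := rfl
  rw [hA, hB]
  have hskip := pvA_skip_spec cs start hs
  set a : Nat := ((cs.drop start.toNat).takeWhile PySem.Chars.isspace).length with ha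
  have hj0 : 0 ≤ pvA_skip cs start := by omega
  have hscan := pvA_scan_spec cs (pvA_skip cs start) hj0
  set b : Nat := ((cs.drop (pvA_skip cs start).toNat).takeWhile pvGood).length with hb
  rw [PySem.List.slice_toNat cs hj0 (by omega)]
  have hkj : (pvA_scan cs (pvA_skip cs start)).toNat - (pvA_skip cs start).toNat = b := by omega
  rw [hkj]
  rw [PySem.List.slice_from cs hs]
  have hjtn : (pvA_skip cs start).toNat = start.toNat + a := by omega
  have hdropj : cs.drop (pvA_skip cs start).toNat
      = (cs.drop start.toNat).dropWhile PySem.Chars.isspace := by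
    have h := pv_drop_length_takeWhile PySem.Chars.isspace (cs.drop start.toNat)
    rw [List.drop_drop] at h
    rw [hjtn, ← h]
  have htake : ((cs.drop start.toNat).dropWhile PySem.Chars.isspace).take b
      = ((cs.drop start.toNat).dropWhile PySem.Chars.isspace).takeWhile pvGood := by
    rw [hb, hdropj]
    exact pv_take_length_takeWhile pvGood _
  rw [hdropj, htake]
  have hfe : (fun c => !(PySem.Chars.isspace c || c == '(' || c == ')')) = pvGood :=
    funext fun c => (pvGood_eq c).symm
  rw [hfe]
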